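-- pv_equiv track=rewrite | github.com/infovvspl/eddva_ai_service | feedback.py | _deduplicate_runs
-- ===== SOURCE A (Python) =====
-- def _deduplicate_runs(lines: list[str], max_run: int = 2) -> list[str]:
--     if not lines:
--         return lines
--     out, run = [lines[0]], 1
--     for line in lines[1:]:
--         if line == out[-1]:
--             run += 1
--             if run <= max_run:
--                 out.append(line)
--         else:
--             run = 1
--             out.append(line)
--     return out
-- ===== SOURCE B (Python) =====
-- def _deduplicate_runs(lines: list[str], max_run: int = 2) -> list[str]:
--     if not lines:
--         return lines
--     out = []
--     i, n = 0, len(lines)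
--     while i < n:
--         j = i
--         while j < n and lines[j] == lines[i]:
--             j += 1
--         out += [lines[i]] * max(1, min(j - i, max_run))
--         i = j
--     return out
-- ===== Notes on version B (the rewrite author's own statement) =====
-- stated objective: alternative
-- what changed: Replaces A's element-by-element state machine (last-kept element + run counter) by a two-pointer scan that finds each maximal run of length n at once and emits the key max(1, min(n, max_run)) times.
import Mathlib
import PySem

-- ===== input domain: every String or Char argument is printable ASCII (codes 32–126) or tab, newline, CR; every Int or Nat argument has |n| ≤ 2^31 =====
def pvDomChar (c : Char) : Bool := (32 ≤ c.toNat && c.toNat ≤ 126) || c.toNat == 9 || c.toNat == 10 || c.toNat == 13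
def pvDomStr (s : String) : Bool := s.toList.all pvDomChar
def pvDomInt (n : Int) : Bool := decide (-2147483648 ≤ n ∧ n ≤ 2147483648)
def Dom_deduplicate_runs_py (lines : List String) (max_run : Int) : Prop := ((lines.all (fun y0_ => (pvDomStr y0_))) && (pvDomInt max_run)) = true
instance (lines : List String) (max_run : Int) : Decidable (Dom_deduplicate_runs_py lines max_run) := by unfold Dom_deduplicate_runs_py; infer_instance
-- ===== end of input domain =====

-- B is an alternative same-cost implementation: a two-pointer run scan instead of A's running state machine.
-- ===== PORT A =====
-- one loop step of A: state is (out reversed, run); out is nonempty so head? gives out[-1]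
def dedupStepA (max_run : Int) (st : List String × Int) (line : String) : List String × Int :=
  match st with
  | (rout, run) =>
    if rout.head? = some line then
      let run' := run + 1
      (if run' ≤ max_run then line :: rout else rout, run')
    else
      (line :: rout, 1)

def deduplicate_runs_py (lines : List String) (max_run : Int) : List String :=
  match lines with
  | [] => []
  | x :: rest => ((rest.foldl (dedupStepA max_run) ([x], 1)).1).reverse

-- ===== PORT B =====
-- inner while loop of B: splits off the prefix of elements equal to x, returning its length and the remainder
def runSplit (x : String) : List String → Nat × List String
  | [] => (0, [])
  | y :: t => if y = x then ((runSplit x t).1 + 1, (runSplit x t).2) else (0, y :: t)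

theorem runSplit_len_le (x : String) (l : List String) : (runSplit x l).2.length ≤ l.length := by
  induction l with
  | nil => simp [runSplit]
  | cons y t ih => by_cases h : y = x <;> simp [runSplit, h] <;> omega

-- outer while loop of B: current run key x, rest of input; emits max(1, min(n, max_run)) copies
def dedupGo (max_run : Int) (x : String) (rest : List String) : List String :=
  List.replicate (max 1 (min (Int.ofNat ((runSplit x rest).1 + 1)) max_run)).toNat x ++
    (match h : (runSplit x rest).2 with
     | [] => []
     | y :: t => dedupGo max_run y t)
termination_by rest.length
decreasing_by
  have hle := runSplit_len_le x rest
  rw [h] at hle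
  simp at hle
  omega

def deduplicate_runs_py_alt (lines : List String) (max_run : Int) : List String :=
  match lines with
  | [] => []
  | x :: rest => dedupGo max_run x rest

-- ===== PRECONDITION & SPEC =====
def Spec_deduplicate_runs_py (lines : List String) (max_run : Int) (out : List String) : Prop := out = deduplicate_runs_py_alt lines max_run
instance (lines : List String) (max_run : Int) (out : List String) : Decidable (Spec_deduplicate_runs_py lines max_run out) := by unfold Spec_deduplicate_runs_py; infer_instance

-- ===== CLAIM (what is proved, stated in full; the proofs are below) =====
def Claim_equal_deduplicate_runs_py : Prop := ∀ (lines : List String) (max_run : Int), Dom_deduplicate_runs_py lines max_run → Spec_deduplicate_runs_py lines max_run (deduplicate_runs_py lines max_run)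

-- ===== LEMMAS AND PROOFS =====

-- number of copies kept of a run once the counter has reached r (r ≥ 1): max(1, min(r, m))
def keepN (r : Nat) (m : Int) : Nat := (max 1 (min (Int.ofNat r) m)).toNat

theorem keepN_pos (r : Nat) (m : Int) : 1 ≤ keepN r m := by
  unfold keepN; simp only [Int.ofNat_eq_natCast] at *; omega

theorem keepN_one (m : Int) : keepN 1 m = 1 := by
  unfold keepN; simp only [Int.ofNat_eq_natCast] at *; omega

theorem keepN_succ_of_le (r : Nat) (m : Int) (hr : 1 ≤ r) (hm : Int.ofNat r + 1 ≤ m) :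
    keepN (r + 1) m = keepN r m + 1 := by
  unfold keepN; simp only [Int.ofNat_eq_natCast] at *; omega

theorem keepN_succ_of_gt (r : Nat) (m : Int) (hr : 1 ≤ r) (hm : ¬ Int.ofNat r + 1 ≤ m) :
    keepN (r + 1) m = keepN r m := by
  unfold keepN; simp only [Int.ofNat_eq_natCast] at *; omega

theorem replicate_append_head (x : String) (k : Nat) (hk : 1 ≤ k) (acc : List String) :
    (List.replicate k x ++ acc).head? = some x := by
  cases k with
  | zero => omega
  | succ n => simp [List.replicate_succ]

-- consuming j more copies of x from a mid-run state
theorem runLemmaA (m : Int) (x : String) (j : Nat) :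
    ∀ (acc : List String) (r : Nat), 1 ≤ r →
    (List.replicate j x).foldl (dedupStepA m) (List.replicate (keepN r m) x ++ acc, Int.ofNat r)
      = (List.replicate (keepN (r + j) m) x ++ acc, Int.ofNat (r + j)) := by
  induction j with
  | zero => intro acc r _; simp
  | succ n ih =>
    intro acc r hr
    rw [List.replicate_succ, List.foldl_cons]
    have hcast : (Int.ofNat r + 1 : Int) = Int.ofNat (r + 1) := by simp
    have hstep : dedupStepA m (List.replicate (keepN r m) x ++ acc, Int.ofNat r) x
        = (List.replicate (keepN (r+1) m) x ++ acc, Int.ofNat (r+1)) := by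
      simp only [dedupStepA, replicate_append_head x _ (keepN_pos r m) acc, if_pos rfl]
      by_cases hm : (Int.ofNat r + 1 : Int) ≤ m
      · rw [if_pos hm, keepN_succ_of_le r m hr hm, List.replicate_succ, hcast]
        simp
      · rw [if_neg hm, keepN_succ_of_gt r m hr hm, hcast]
        simp
    rw [hstep, ih acc (r+1) (by omega)]
    have harith : r + 1 + n = r + (n + 1) := by omega
    rw [harith]

-- decompose rest into its leading run via runSplit
theorem runSplit_decomp (x : String) (l : List String) :
    l = List.replicate (runSplit x l).1 x ++ (runSplit x l).2 ∧
    ((runSplit x l).2 = [] ∨ (runSplit x l).2.head? ≠ some x) := by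
  induction l with
  | nil => simp [runSplit]
  | cons y t ih =>
    by_cases h : y = x
    · subst h
      constructor
      · simp only [runSplit, if_pos rfl]
        exact congrArg (y :: ·) ih.1
      · simpa only [runSplit, if_pos rfl] using ih.2
    · constructor
      · simp [runSplit, h]
      · right
        simp only [runSplit, if_neg h, List.head?_cons]
        intro hc
        exact h (by simpa using hc)

-- unfolding equations for dedupGo, by cases on the leading run split
theorem dedupGo_nil (m : Int) (x : String) (rest : List String) (k : Nat)
    (hE : runSplit x rest = (k, ([] : List String))) :
    dedupGo m x rest = List.replicate (keepN (k + 1) m) x := by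
  rw [dedupGo]
  split
  · next h =>
    simp only [hE] at h ⊢
    simp [keepN]
  · next y' t' h =>
    rw [hE] at h
    simp at h

theorem dedupGo_cons (m : Int) (x : String) (rest : List String) (k : Nat) (y : String)
    (t : List String) (hE : runSplit x rest = (k, y :: t)) :
    dedupGo m x rest = List.replicate (keepN (k + 1) m) x ++ dedupGo m y t := by
  rw [dedupGo]
  split
  · next h =>
    rw [hE] at h
    simp at h
  · next y' t' h =>
    rw [hE] at h
    obtain ⟨rfl, rfl⟩ := by simpa using h
    simp only [hE]
    simp [keepN]

-- main loop correspondence: A's fold from a fresh-run state equals acc plus B's outer loop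
theorem mainLemma (m : Int) :
    ∀ (n : Nat) (rest : List String), rest.length ≤ n → ∀ (x : String) (acc : List String),
    ((rest.foldl (dedupStepA m) (x :: acc, 1)).1).reverse = acc.reverse ++ dedupGo m x rest := by
  intro n
  induction n with
  | zero =>
    intro rest hn x acc
    have : rest = [] := by cases rest <;> simp_all
    subst this
    rw [dedupGo_nil m x [] 0 rfl, keepN_one]
    simp
  | succ n ih =>
    intro rest hn x acc
    obtain ⟨hdec, hbound⟩ := runSplit_decomp x rest
    rcases hE : runSplit x rest with ⟨k, rest'⟩
    rw [hE] at hdec hbound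
    simp only at hdec hbound
    have hx1 : (x :: acc) = List.replicate (keepN 1 m) x ++ acc := by
      rw [keepN_one]; simp
    have hfold1 : (List.replicate k x).foldl (dedupStepA m) (x :: acc, 1)
        = (List.replicate (keepN (1 + k) m) x ++ acc, Int.ofNat (1 + k)) := by
      rw [hx1]
      exact runLemmaA m x k acc 1 (le_refl 1)
    conv_lhs => rw [hdec, List.foldl_append, hfold1]
    cases rest' with
    | nil =>
      rw [dedupGo_nil m x rest k hE]
      simp only [List.foldl_nil, List.reverse_append, List.reverse_replicate]
      simp [Nat.add_comm 1 k]
    | cons y t =>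
      rw [dedupGo_cons m x rest k y t hE]
      have hy : y ≠ x := by
        rcases hbound with h | h
        · exact absurd h (by simp)
        · intro hc; exact h (by simp [hc])
      have hhead : (List.replicate (keepN (1+k) m) x ++ acc).head? ≠ some y := by
        rw [replicate_append_head x _ (keepN_pos (1+k) m) acc]
        exact fun hc => hy (Option.some.inj hc).symm
      have hstep : dedupStepA m (List.replicate (keepN (1+k) m) x ++ acc, Int.ofNat (1+k)) y
          = (y :: (List.replicate (keepN (1+k) m) x ++ acc), 1) := by
        simp only [dedupStepA]
        rw [if_neg hhead]
      have hlt : t.length ≤ n := by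
        have h1 : (runSplit x rest).2.length ≤ rest.length := runSplit_len_le x rest
        rw [hE] at h1; simp at h1; omega
      rw [List.foldl_cons, hstep, ih t hlt y (List.replicate (keepN (1+k) m) x ++ acc)]
      simp [Nat.add_comm 1 k]

-- ===== VERDICT (by name: the statement is the Claim_ definition above) =====
theorem deduplicate_runs_py_spec : Claim_equal_deduplicate_runs_py := by
  intro lines max_run _
  unfold Spec_deduplicate_runs_py deduplicate_runs_py deduplicate_runs_py_alt
  cases lines with
  | nil => rfl
  | cons x rest =>
    simpa using mainLemma max_run rest.length rest (le_refl _) x []
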